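-- pv_equiv track=rewrite | github.com/Jorgro/ITGK | Øving 9/Opptaksgrenser.py | linesplitter
-- ===== SOURCE A (Python) =====
-- def linesplitter(line):
--     newstring = []
--     for i in range(len(line)):
--         if line[i] == '.':
--             newstring.append('.')
--         elif line[i] == ',':
--             newstring.append(' ')
--         elif line[i].isalnum() or line[i] == ' ':
--             newstring.append(line[i])
--
--     newstring2 =''.join(newstring)
--     return newstring2.split()
-- ===== SOURCE B (Python) =====
-- def linesplitter(line):
--     result = []
--     word = []
--     for ch in line:
--         if ch == ' ' or ch == ',':
--             if word:
--                 result.append(''.join(word))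
--                 word = []
--         elif ch == '.':
--             word.append('.')
--         elif ch.isalnum():
--             word.append(ch)
--     if word:
--         result.append(''.join(word))
--     return result
-- ===== Notes on version B (the rewrite author's own statement) =====
-- stated objective: faster
-- what changed: Single pass with a word accumulator that emits tokens directly, instead of building a filtered char list, joining it into a string and calling split() on it.
import Mathlib
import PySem

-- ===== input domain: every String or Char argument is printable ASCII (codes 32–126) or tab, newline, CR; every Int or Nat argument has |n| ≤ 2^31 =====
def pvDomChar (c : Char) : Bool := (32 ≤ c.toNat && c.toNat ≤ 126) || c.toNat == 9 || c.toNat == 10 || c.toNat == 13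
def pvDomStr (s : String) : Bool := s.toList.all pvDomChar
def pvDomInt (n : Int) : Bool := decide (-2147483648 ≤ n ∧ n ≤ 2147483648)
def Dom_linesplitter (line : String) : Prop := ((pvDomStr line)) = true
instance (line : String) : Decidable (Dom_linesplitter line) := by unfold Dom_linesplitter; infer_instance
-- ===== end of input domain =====

-- B replaces A's filter-then-split() pipeline by a single pass that accumulates each word
-- and emits it at separators (alternative decomposition, same cost).


-- ===== PORT A =====
/-- the body of A's `for i in range(len(line))` loop -/
def aStep (cs : List Char) (acc : List Char) (i : Int) : List Char :=
  let c := PySem.List.pyGetD cs i ' '   -- line[i]: index always in range here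
  if c = '.' then acc ++ ['.']
  else if c = ',' then acc ++ [' ']
  else if PySem.Chars.isalnum c || c = ' ' then acc ++ [c]
  else acc

def linesplitter (line : String) : List String :=
  let cs := line.toList
  let newstring : List Char := (PySem.List.pyRange 0 (PySem.List.len cs)).foldl (aStep cs) []
  PySem.Str.split₀ (String.ofList newstring)

-- ===== PORT B =====
def altStep (st : List String × List Char) (c : Char) : List String × List Char :=
  if c = ' ' || c = ',' then
    if st.2.isEmpty then st else (st.1 ++ [String.ofList st.2], [])
  else if c = '.' then (st.1, st.2 ++ ['.'])
  else if PySem.Chars.isalnum c then (st.1, st.2 ++ [c])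
  else st

def linesplitter_alt (line : String) : List String :=
  let st := line.toList.foldl altStep ([], [])
  if st.2.isEmpty then st.1 else st.1 ++ [String.ofList st.2]

-- ===== PRECONDITION & SPEC =====
def Spec_linesplitter (line : String) (out : List String) : Prop := out = linesplitter_alt line
instance (line : String) (out : List String) : Decidable (Spec_linesplitter line out) := by unfold Spec_linesplitter; infer_instance

-- ===== CLAIM (what is proved, stated in full; the proofs are below) =====
def Claim_equal_linesplitter : Prop := ∀ (line : String), Dom_linesplitter line → Spec_linesplitter line (linesplitter line)

-- ===== LEMMAS AND PROOFS =====

/-- The chars A's loop appends for one input char. -/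
def pvF (c : Char) : List Char :=
  if c = '.' then ['.']
  else if c = ',' then [' ']
  else if PySem.Chars.isalnum c || c = ' ' then [c]
  else []

lemma pvStep_eq (acc : List Char) (c : Char) :
    (if c = '.' then acc ++ ['.']
     else if c = ',' then acc ++ [' ']
     else if PySem.Chars.isalnum c || c = ' ' then acc ++ [c]
     else acc) = acc ++ pvF c := by
  unfold pvF; split_ifs <;> simp

lemma pvAlnum_not_space (c : Char) (h : PySem.Chars.isalnum c = true) :
    PySem.Chars.isspace c = false := by
  unfold PySem.Chars.isalnum PySem.Chars.isalpha PySem.Chars.isdigit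
    PySem.Chars.isupper PySem.Chars.islower at h
  unfold PySem.Chars.isspace
  simp only [Bool.or_eq_true, Bool.and_eq_true, decide_eq_true_eq, Char.le_def,
    UInt32.le_iff_toNat_le, Bool.or_eq_false_iff, Bool.and_eq_false_iff,
    decide_eq_false_iff_not] at h ⊢
  have hA : ('A'.val.toNat) = 65 := rfl
  have hZ : ('Z'.val.toNat) = 90 := rfl
  have ha : ('a'.val.toNat) = 97 := rfl
  have hz : ('z'.val.toNat) = 122 := rfl
  have h0 : ('0'.val.toNat) = 48 := rfl
  have h9 : ('9'.val.toNat) = 57 := rfl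
  have hc : c.toNat = c.val.toNat := rfl
  rw [hA, hZ, ha, hz, h0, h9] at h
  rw [hc]
  omega

/-- B's final flush. -/
def pvFinish (st : List String × List Char) : List String :=
  if st.2.isEmpty then st.1 else st.1 ++ [String.ofList st.2]

lemma pvMain (cs : List Char) : ∀ (cur : List Char) (acc : List (List Char)),
    (PySem.Chars.split₀.go (cs.flatMap pvF) cur acc).map String.ofList
      = pvFinish (cs.foldl altStep (acc.reverse.map String.ofList, cur.reverse)) := by
  induction cs with
  | nil =>
    intro cur acc
    simp only [List.flatMap_nil, List.foldl_nil, PySem.Chars.split₀.go, pvFinish]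
    rcases cur with _ | ⟨c, cur⟩ <;> simp
  | cons c rest ih =>
    intro cur acc
    simp only [List.flatMap_cons, List.foldl_cons]
    by_cases hdot : c = '.'
    · subst hdot
      rw [show pvF '.' = ['.'] from rfl]
      simp only [List.cons_append, List.nil_append, PySem.Chars.split₀.go,
        show PySem.Chars.isspace '.' = false from rfl, Bool.false_eq_true, if_false]
      rw [ih ('.' :: cur) acc]
      simp [altStep]
    · by_cases hcom : c = ','
      · subst hcom
        rw [show pvF ',' = [' '] from rfl]
        simp only [List.cons_append, List.nil_append, PySem.Chars.split₀.go,
          show PySem.Chars.isspace ' ' = true from rfl, if_true]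
        rcases cur with _ | ⟨d, cur⟩
        · simp only [List.isEmpty_nil, if_true]
          rw [ih [] acc]; simp [altStep]
        · simp only [List.isEmpty_cons, Bool.false_eq_true, if_false]
          rw [ih [] ((d :: cur).reverse :: acc)]
          simp [altStep]
      · by_cases hsp : c = ' '
        · subst hsp
          rw [show pvF ' ' = [' '] from rfl]
          simp only [List.cons_append, List.nil_append, PySem.Chars.split₀.go,
            show PySem.Chars.isspace ' ' = true from rfl, if_true]
          rcases cur with _ | ⟨d, cur⟩
          · simp only [List.isEmpty_nil, if_true]
            rw [ih [] acc]; simp [altStep]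
          · simp only [List.isEmpty_cons, Bool.false_eq_true, if_false]
            rw [ih [] ((d :: cur).reverse :: acc)]
            simp [altStep]
        · by_cases hal : PySem.Chars.isalnum c = true
          · have hf : pvF c = [c] := by simp [pvF, hdot, hcom, hal]
            rw [hf]
            simp only [List.cons_append, List.nil_append, PySem.Chars.split₀.go,
              pvAlnum_not_space c hal, Bool.false_eq_true, if_false]
            rw [ih (c :: cur) acc]
            simp [altStep, hdot, hcom, hsp, hal]
          · have hf : pvF c = [] := by
              simp [pvF, hdot, hcom, hsp, hal]
            rw [hf, List.nil_append, ih cur acc]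
            have : altStep (acc.reverse.map String.ofList, cur.reverse) c
                = (acc.reverse.map String.ofList, cur.reverse) := by
              simp [altStep, hdot, hcom, hsp, hal]
            rw [this]

lemma pvA_flat (cs : List Char) :
    List.foldl (aStep cs) [] (PySem.List.pyRange 0 (PySem.List.len cs)) = cs.flatMap pvF := by
  have h1 : aStep cs = fun acc i => acc ++ pvF (PySem.List.pyGetD cs i ' ') := by
    funext acc i
    exact pvStep_eq acc _
  rw [h1]
  have h2 := PySem.List.foldl_pyRange_pyGetD cs ' ' (fun acc c => acc ++ pvF c) []
    (le_refl (0 : Int))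
  simpa [PySem.List.foldl_append_eq_flatMap] using h2

-- ===== VERDICT (by name: the statement is the Claim_ definition above) =====
theorem linesplitter_spec : Claim_equal_linesplitter := by
  intro line _
  unfold Spec_linesplitter linesplitter linesplitter_alt
  dsimp only
  rw [pvA_flat line.toList]
  simp only [PySem.Str.split₀, String.toList_ofList, PySem.Chars.split₀]
  rw [pvMain line.toList [] []]
  simp [pvFinish]
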